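-- pv_equiv track=rewrite | github.com/SeasonedMiso/Anki-Dictionary-Addon | midict.py | formatTermHeaders
-- ===== SOURCE A (Python) =====
-- def formatTermHeaders(ths):
--     formattedHeaders = {}
--     if not ths:
--         return None
--     for dictname in ths:
--         headerString = ''
--         sbHeaderString = ''
--         for header in ths[dictname]:
--             if header == 'term':
--                 headerString += '◳f<span class="term mainword">◳t</span>◳b'
--                 sbHeaderString += '◳f<span class="listTerm">◳t</span>◳b'
--             elif header == 'altterm':
--                 headerString += '◳x<span class="altterm  mainword">◳a</span>◳y'
--                 sbHeaderString += '◳x<span class="listAltTerm">◳a</span>◳y'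
--             elif header == 'pronunciation':
--                 headerString += '<span class="pronunciation">◳p</span>'
--                 sbHeaderString += '<span class="listPronunciation">◳p</span>'
--         formattedHeaders[dictname] = [headerString, sbHeaderString]
--     return formattedHeaders
-- ===== SOURCE B (Python) =====
-- _FRAGMENTS = {
--     'term': ('\u25f3f<span class="term mainword">\u25f3t</span>\u25f3b',
--              '\u25f3f<span class="listTerm">\u25f3t</span>\u25f3b'),
--     'altterm': ('\u25f3x<span class="altterm  mainword">\u25f3a</span>\u25f3y',
--                 '\u25f3x<span class="listAltTerm">\u25f3a</span>\u25f3y'),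
--     'pronunciation': ('<span class="pronunciation">\u25f3p</span>',
--                       '<span class="listPronunciation">\u25f3p</span>'),
-- }
--
--
-- def _fmt(headers):
--     # recursive, built back-to-front: format the tail first, then prepend
--     # this header's fragments (unrecognized headers contribute '').
--     if not headers:
--         return ('', '')
--     main, side = _FRAGMENTS.get(headers[0], ('', ''))
--     rest_main, rest_side = _fmt(headers[1:])
--     return (main + rest_main, side + rest_side)
--
--
-- def formatTermHeaders(ths):
--     if not ths:
--         return None
--     return {name: list(_fmt(headers)) for name, headers in ths.items()}
-- ===== Notes on version B (the rewrite author's own statement) =====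
-- stated objective: alternative
-- what changed: Replaces A's iterative per-header if/elif chain with two running += accumulators by a recursive helper that builds each [header, sidebar] pair back-to-front (format the tail, prepend this header's fragments taken from a prebuilt table with '' default), assembled via a dict comprehension.
import Mathlib
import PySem

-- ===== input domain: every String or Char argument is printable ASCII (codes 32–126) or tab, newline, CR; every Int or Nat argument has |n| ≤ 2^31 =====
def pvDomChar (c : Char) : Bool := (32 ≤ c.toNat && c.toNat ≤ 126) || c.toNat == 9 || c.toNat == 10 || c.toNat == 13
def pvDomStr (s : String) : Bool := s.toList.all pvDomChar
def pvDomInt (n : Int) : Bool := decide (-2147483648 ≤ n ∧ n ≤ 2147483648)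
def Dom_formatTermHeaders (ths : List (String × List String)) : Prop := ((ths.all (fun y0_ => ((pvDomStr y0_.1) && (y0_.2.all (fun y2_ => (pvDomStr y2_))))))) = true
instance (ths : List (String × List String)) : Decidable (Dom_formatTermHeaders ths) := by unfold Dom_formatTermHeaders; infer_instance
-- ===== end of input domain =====

-- B replaces A's iterative if/elif accumulator loop by a recursive helper that builds each
-- header pair back-to-front from a prebuilt fragment table with '' default (alternative, same cost).


-- ===== PORT A =====
-- inner loop body: the if/elif chain appending to (headerString, sbHeaderString)
def pvStepA (acc : String × String) (header : String) : String × String :=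
  if header = "term" then
    (acc.1 ++ "◳f<span class=\"term mainword\">◳t</span>◳b",
     acc.2 ++ "◳f<span class=\"listTerm\">◳t</span>◳b")
  else if header = "altterm" then
    (acc.1 ++ "◳x<span class=\"altterm  mainword\">◳a</span>◳y",
     acc.2 ++ "◳x<span class=\"listAltTerm\">◳a</span>◳y")
  else if header = "pronunciation" then
    (acc.1 ++ "<span class=\"pronunciation\">◳p</span>",
     acc.2 ++ "<span class=\"listPronunciation\">◳p</span>")
  else acc

def formatTermHeaders (ths : List (String × List String)) : Option (List (String × List String)) :=
  let formattedHeaders : PySem.Dict String (List String) := PySem.Dict.empty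
  if ths = [] then none
  else
    let D : PySem.Dict String (List String) := PySem.Dict.mk ths
    some (PySem.Dict.items (D.keys.foldl
      (fun fh dictname =>
        let p := (D.getD dictname []).foldl pvStepA ("", "")
        fh.insert dictname [p.1, p.2]) formattedHeaders))

-- ===== PORT B =====
-- the prebuilt fragment table _FRAGMENTS of Source B
def pvTable : PySem.Dict String (String × String) := PySem.Dict.mk
  [ ("term", ("◳f<span class=\"term mainword\">◳t</span>◳b",
              "◳f<span class=\"listTerm\">◳t</span>◳b")),
    ("altterm", ("◳x<span class=\"altterm  mainword\">◳a</span>◳y",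
                 "◳x<span class=\"listAltTerm\">◳a</span>◳y")),
    ("pronunciation", ("<span class=\"pronunciation\">◳p</span>",
                       "<span class=\"listPronunciation\">◳p</span>")) ]

-- recursive helper _fmt of Source B: build the pair back-to-front
def pvFmt : List String → String × String
  | [] => ("", "")
  | h :: rest =>
    let p := PySem.Dict.getD pvTable h ("", "")
    let r := pvFmt rest
    (p.1 ++ r.1, p.2 ++ r.2)

def formatTermHeaders_alt (ths : List (String × List String)) : Option (List (String × List String)) :=
  if ths = [] then none
  else some (ths.map (fun e => (e.1, [(pvFmt e.2).1, (pvFmt e.2).2])))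

-- ===== PRECONDITION & SPEC =====
-- Pre_ excludes association lists with duplicate dictionary names: the Python argument is a
-- dict, whose encoding as a list of pairs never contains a duplicate key.
def Pre_formatTermHeaders (ths : List (String × List String)) : Prop := (ths.map Prod.fst).Nodup
instance (ths : List (String × List String)) : Decidable (Pre_formatTermHeaders ths) := by unfold Pre_formatTermHeaders; infer_instance

def pvWitness_formatTermHeaders : (List (String × List String)) :=
  [("dictA", ["term", "foo", "pronunciation"]), ("dictB", ["altterm"])]

def Spec_formatTermHeaders (ths : List (String × List String)) (out : Option (List (String × List String))) : Prop := out = formatTermHeaders_alt ths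
instance (ths : List (String × List String)) (out : Option (List (String × List String))) : Decidable (Spec_formatTermHeaders ths out) := by unfold Spec_formatTermHeaders; infer_instance

-- ===== CLAIM (what is proved, stated in full; the proofs are below) =====
def Claim_equal_formatTermHeaders : Prop := ∀ (ths : List (String × List String)), Dom_formatTermHeaders ths → Pre_formatTermHeaders ths → Spec_formatTermHeaders ths (formatTermHeaders ths)

-- ===== LEMMAS AND PROOFS =====

-- A's inner if/elif loop equals B's back-to-front recursion, with an arbitrary accumulator
lemma pv_inner (hs : List String) : ∀ (h sb : String),
    hs.foldl pvStepA (h, sb) = (h ++ (pvFmt hs).1, sb ++ (pvFmt hs).2) := by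
  induction hs with
  | nil => intro h sb; simp [pvFmt]
  | cons a t ih =>
    intro h sb
    by_cases h1 : a = "term"
    · subst h1
      simp only [List.foldl_cons, pvStepA, ih, pvFmt]
      simp [PySem.Dict.getD, PySem.Dict.get?, pvTable, String.append_assoc]
    · by_cases h2 : a = "altterm"
      · subst h2
        simp only [List.foldl_cons, pvStepA, reduceIte, ih, pvFmt]
        simp [PySem.Dict.getD, PySem.Dict.get?, pvTable, String.append_assoc]
      · by_cases h3 : a = "pronunciation"
        · subst h3
          simp only [List.foldl_cons, pvStepA, reduceIte, ih, pvFmt]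
          simp [PySem.Dict.getD, PySem.Dict.get?, pvTable, String.append_assoc]
        · have e1 : ("term" == a) = false := by
            rw [beq_eq_false_iff_ne]; exact fun h => h1 h.symm
          have e2 : ("altterm" == a) = false := by
            rw [beq_eq_false_iff_ne]; exact fun h => h2 h.symm
          have e3 : ("pronunciation" == a) = false := by
            rw [beq_eq_false_iff_ne]; exact fun h => h3 h.symm
          have hget : PySem.Dict.getD pvTable a ("", "") = ("", "") := by
            simp only [PySem.Dict.getD, PySem.Dict.get?, pvTable]
            simp [List.find?, e1, e2, e3]
          simp only [List.foldl_cons, pvStepA, if_neg h1, if_neg h2, if_neg h3, ih, pvFmt, hget]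
          simp

-- ===== VERDICT (by name: the statement is the Claim_ definition above) =====
theorem formatTermHeaders_spec : Claim_equal_formatTermHeaders := by
  intro ths _hdom hpre
  unfold Spec_formatTermHeaders formatTermHeaders formatTermHeaders_alt
  by_cases hnil : ths = []
  · simp [hnil]
  · simp only [if_neg hnil]
    congr 1
    have hkeys : (PySem.Dict.mk ths).keys = ths.map Prod.fst := by
      simp [PySem.Dict.keys_mk]
    have hnd : (PySem.Dict.mk ths).keys.Nodup := by rw [hkeys]; exact hpre
    have hfresh := PySem.Dict.items_foldl_insert_fresh
        ((PySem.Dict.mk ths).keys)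
        (fun a => a)
        (fun dictname =>
          [(((PySem.Dict.mk ths).getD dictname []).foldl pvStepA ("", "")).1,
           (((PySem.Dict.mk ths).getD dictname []).foldl pvStepA ("", "")).2])
        PySem.Dict.empty
        (by intro a _; simp [PySem.Dict.contains_empty])
        (by simpa using hnd)
    rw [hfresh]
    simp only [PySem.Dict.empty, List.nil_append, hkeys, List.map_map]
    apply List.map_congr_left
    intro e he
    have hgetD : (PySem.Dict.mk ths).getD e.1 [] = e.2 :=
      PySem.Dict.getD_of_mem_items _ (by simpa using he) (by rw [hkeys]; exact hpre) []
    simp only [Function.comp, hgetD, pv_inner e.2 "" ""]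
    simp
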